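-- pv_equiv track=rewrite | github.com/CasperWA/voila-optimade-client | optimade_client/logger.py | apply_correct_formatter_sequences
-- ===== SOURCE A (Python) =====
-- RESET_SEQ = "\033[0m"
--
-- COLOR_SEQ = "\033[%dm"  # Can instead be "\033[<FOREGROUND (+30)>;<BACKGROUND (+40)>m"
--
-- BOLD_SEQ = "\033[1m"
--
-- def apply_correct_formatter_sequences(message: str):
--     """Replace human-readable bash-like variables with correct sequences"""
--     mapping = {
--         "$RESET": RESET_SEQ,
--         "$COLOR": COLOR_SEQ,
--         "$BOLD": BOLD_SEQ,
--     }
--     for variable in mapping: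
--         message = message.replace(variable, mapping[variable])
--     return message
-- ===== SOURCE B (Python) =====
-- RESET_SEQ = "\033[0m"
-- COLOR_SEQ = "\033[%dm"
-- BOLD_SEQ = "\033[1m"
--
-- _TOKENS = (("$RESET", RESET_SEQ), ("$COLOR", COLOR_SEQ), ("$BOLD", BOLD_SEQ))
--
--
-- def apply_correct_formatter_sequences(message: str):
--     """Replace human-readable bash-like variables with correct sequences.
--
--     Single left-to-right scan: at each position substitute the first
--     matching token from the table, instead of one full pass per token.
--     """
--     out = []
--     i = 0
--     n = len(message)
--     while i < n:
--         for token, seq in _TOKENS: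
--             if message.startswith(token, i):
--                 out.append(seq)
--                 i += len(token)
--                 break
--         else:
--             out.append(message[i])
--             i += 1
--     return "".join(out)
-- ===== Notes on version B (the rewrite author's own statement) =====
-- stated objective: alternative
-- what changed: Replaces three successive full-string str.replace passes by one left-to-right scan that substitutes the first matching token from a table at each position.
import Mathlib
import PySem

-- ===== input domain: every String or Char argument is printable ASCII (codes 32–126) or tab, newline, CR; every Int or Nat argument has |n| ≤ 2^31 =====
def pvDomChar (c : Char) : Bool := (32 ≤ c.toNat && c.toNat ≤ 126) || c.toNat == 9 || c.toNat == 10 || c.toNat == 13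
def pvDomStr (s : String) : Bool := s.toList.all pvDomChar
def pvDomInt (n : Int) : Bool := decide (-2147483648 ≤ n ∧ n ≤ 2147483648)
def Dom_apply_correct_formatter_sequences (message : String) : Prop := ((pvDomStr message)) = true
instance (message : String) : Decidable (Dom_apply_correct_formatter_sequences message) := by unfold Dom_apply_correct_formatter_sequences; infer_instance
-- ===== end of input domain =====

-- B replaces A's three successive full-string replace passes by one left-to-right
-- table-driven scan (alternative decomposition; equal return value proved on Dom).


-- ===== PORT A =====
def RESET_SEQ : String := "\x1b[0m"
def COLOR_SEQ : String := "\x1b[%dm"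
def BOLD_SEQ : String := "\x1b[1m"

-- literal port of A: build the dict, then `for variable in mapping:` replace it in message
def apply_correct_formatter_sequences (message : String) : String :=
  let mapping : PySem.Dict String String :=
    ((PySem.Dict.empty.insert "$RESET" RESET_SEQ).insert "$COLOR" COLOR_SEQ).insert "$BOLD" BOLD_SEQ
  (PySem.Dict.keys mapping).foldl
    (fun m variable_ => PySem.Str.replace m variable_ (PySem.Dict.getD mapping variable_ "")) message

-- ===== PORT B =====
-- port of Source B's single while-loop over positions: at each position, the first matching
-- token of the 3-entry table is substituted and skipped, else the character is copied.
-- Source B's `for token, seq in _TOKENS: if message.startswith(token, i): … break / else copy`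
-- is transcribed as this if-chain over the same table, token/sequence strings as char lists.
def pvScan : List Char → List Char
  | [] => []
  | c :: t =>
    if ['$','R','E','S','E','T'].isPrefixOf (c :: t) then
      ['\x1b','[','0','m'] ++ pvScan (t.drop 5)
    else if ['$','C','O','L','O','R'].isPrefixOf (c :: t) then
      ['\x1b','[','%','d','m'] ++ pvScan (t.drop 5)
    else if ['$','B','O','L','D'].isPrefixOf (c :: t) then
      ['\x1b','[','1','m'] ++ pvScan (t.drop 4)
    else c :: pvScan t
termination_by l => l.length
decreasing_by all_goals (simp [List.length_drop]; try omega)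

def apply_correct_formatter_sequences_alt (message : String) : String :=
  String.ofList (pvScan message.toList)

-- ===== PRECONDITION & SPEC =====
def Spec_apply_correct_formatter_sequences (message : String) (out : String) : Prop := out = apply_correct_formatter_sequences_alt message
instance (message : String) (out : String) : Decidable (Spec_apply_correct_formatter_sequences message out) := by unfold Spec_apply_correct_formatter_sequences; infer_instance

-- ===== CLAIM (what is proved, stated in full; the proofs are below) =====
def Claim_equal_apply_correct_formatter_sequences : Prop := ∀ (message : String), Dom_apply_correct_formatter_sequences message → Spec_apply_correct_formatter_sequences message (apply_correct_formatter_sequences message)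

-- ===== LEMMAS AND PROOFS =====

-- structural version of PySem.Chars.replace (meaningful for a nonempty pattern)
def pvRep (old new : List Char) : List Char → List Char
  | [] => []
  | c :: t =>
    if old.isPrefixOf (c :: t) then new ++ pvRep old new (t.drop (old.length - 1))
    else c :: pvRep old new t
termination_by l => l.length
decreasing_by all_goals (simp [List.length_drop]; try omega)

theorem pvRep_nil (old new : List Char) : pvRep old new [] = [] := by
  simp [pvRep]

theorem pvRep_pos (old new : List Char) (c : Char) (t : List Char)
    (h : old.isPrefixOf (c :: t) = true) :
    pvRep old new (c :: t) = new ++ pvRep old new (t.drop (old.length - 1)) := by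
  rw [pvRep, if_pos h]

theorem pvRep_neg (old new : List Char) (c : Char) (t : List Char)
    (h : ¬ old.isPrefixOf (c :: t) = true) :
    pvRep old new (c :: t) = c :: pvRep old new t := by
  rw [pvRep, if_neg h]

theorem pvGo_eq (old new : List Char) (hold : old ≠ []) :
    ∀ (fuel : Nat) (l acc : List Char), l.length ≤ fuel →
      PySem.Chars.replace.go old new fuel l acc = acc.reverse ++ pvRep old new l := by
  intro fuel
  induction fuel with
  | zero =>
    intro l acc h
    cases l with
    | nil => rw [PySem.Chars.replace.go]; simp [pvRep_nil]
    | cons c t => simp at h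
  | succ f ih =>
    intro l acc h
    cases l with
    | nil =>
      rw [PySem.Chars.replace.go]; simp [pvRep_nil]; omega
    | cons c t =>
      rw [PySem.Chars.replace.go]
      by_cases hp : old.isPrefixOf (c :: t) = true
      · simp only [hp, if_true]
        obtain ⟨o, old', rfl⟩ : ∃ o old', old = o :: old' := by
          cases old with
          | nil => exact absurd rfl hold
          | cons o old' => exact ⟨o, old', rfl⟩
        have hlen : (List.drop (o :: old').length (c :: t)).length ≤ f := by
          simp at h ⊢; omega
        rw [ih _ _ hlen, pvRep_pos _ _ _ _ hp]
        simp [List.append_assoc]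
      · simp only [hp, if_false, Bool.false_eq_true]
        have hlen : t.length ≤ f := by simp at h; omega
        rw [ih _ _ hlen, pvRep_neg _ _ _ _ hp]
        simp

theorem pvReplace_eq (s old new : List Char) (hold : old ≠ []) :
    PySem.Chars.replace s old new = pvRep old new s := by
  unfold PySem.Chars.replace
  have he : old.isEmpty = false := by cases old <;> simp_all
  rw [he]
  simpa using pvGo_eq old new hold s.length s [] le_rfl

-- scanning past a chunk that contains no '$' (all patterns start with '$')
theorem pvRep_append (old' n u X : List Char) (hu : '$' ∉ u) :
    pvRep ('$' :: old') n (u ++ X) = u ++ pvRep ('$' :: old') n X := by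
  induction u with
  | nil => rfl
  | cons c u ihu =>
    have hc : c ≠ '$' := by rintro rfl; simp at hu
    have hnp : ¬ ((('$' :: old').isPrefixOf (c :: (u ++ X))) = true) := by
      intro hx
      exact hc ((List.cons_prefix_cons.mp (List.isPrefixOf_iff_prefix.mp hx)).1).symm
    rw [List.cons_append, pvRep_neg _ _ _ _ hnp, ihu (by simp_all)]
    simp

-- a pattern-free, escape-free token q survives pvRep unchanged as a prefix
theorem pvPrefix_rep_iff (p' n' : List Char) (e : Char) :
    ∀ (q t : List Char), '$' ∉ q → e ∉ q →
      (q <+: pvRep ('$' :: p') (e :: n') t ↔ q <+: t) := by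
  intro q
  induction q with
  | nil => intro t _ _; simp
  | cons a q ihq =>
    intro t hq he
    cases t with
    | nil => simp [pvRep_nil]
    | cons c t =>
      by_cases hp : ('$' :: p').isPrefixOf (c :: t) = true
      · rw [pvRep_pos _ _ _ _ hp]
        have hc : c = '$' :=
          ((List.cons_prefix_cons.mp (List.isPrefixOf_iff_prefix.mp hp)).1).symm
        constructor
        · intro hx
          have := (List.cons_prefix_cons.mp hx).1
          exact absurd this.symm (by rintro rfl; simp at he)
        · intro hx
          have := (List.cons_prefix_cons.mp hx).1
          exact absurd (this.trans hc) (by rintro rfl; simp at hq)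
      · rw [pvRep_neg _ _ _ _ hp, List.cons_prefix_cons, List.cons_prefix_cons,
          ihq t (by simp_all) (by simp_all)]

-- literal shorthands
theorem pvRo_eq : "$RESET".toList = ['$','R','E','S','E','T'] := rfl
theorem pvCo_eq : "$COLOR".toList = ['$','C','O','L','O','R'] := rfl
theorem pvBo_eq : "$BOLD".toList = ['$','B','O','L','D'] := rfl
theorem pvRn_eq : RESET_SEQ.toList = ['\x1b','[','0','m'] := rfl
theorem pvCn_eq : COLOR_SEQ.toList = ['\x1b','[','%','d','m'] := rfl
theorem pvBn_eq : BOLD_SEQ.toList = ['\x1b','[','1','m'] := rfl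

-- the single-scan equals the three-pass composition
theorem pvMain : ∀ (n : Nat) (s : List Char), s.length ≤ n →
    pvRep ['$','B','O','L','D'] ['\x1b','[','1','m']
      (pvRep ['$','C','O','L','O','R'] ['\x1b','[','%','d','m']
        (pvRep ['$','R','E','S','E','T'] ['\x1b','[','0','m'] s)) = pvScan s := by
  intro n
  induction n with
  | zero =>
    intro s h
    cases s with
    | nil => simp [pvRep_nil, pvScan]
    | cons c t => simp at h
  | succ k ih =>
    intro s h
    cases s with
    | nil => simp [pvRep_nil, pvScan]
    | cons c t =>
      by_cases h1 : (['$','R','E','S','E','T'] : List Char).isPrefixOf (c :: t) = true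
      · obtain ⟨r, hr⟩ := List.isPrefixOf_iff_prefix.mp h1
        obtain ⟨rfl, rfl⟩ : c = '$' ∧ t = 'R'::'E'::'S'::'E'::'T'::r := by
          simpa [eq_comm, List.cons.injEq] using hr.symm
        have hlen : r.length ≤ k := by simp at h; omega
        rw [pvScan, if_pos h1, pvRep_pos _ _ _ _ h1]
        have hskip1 : pvRep ['$','C','O','L','O','R'] ['\x1b','[','%','d','m']
            (['\x1b','[','0','m'] ++ pvRep ['$','R','E','S','E','T'] ['\x1b','[','0','m'] r)
            = ['\x1b','[','0','m'] ++ pvRep ['$','C','O','L','O','R'] ['\x1b','[','%','d','m']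
                (pvRep ['$','R','E','S','E','T'] ['\x1b','[','0','m'] r) :=
          pvRep_append _ _ _ _ (by decide)
        have hskip2 : pvRep ['$','B','O','L','D'] ['\x1b','[','1','m']
            (['\x1b','[','0','m'] ++ pvRep ['$','C','O','L','O','R'] ['\x1b','[','%','d','m']
                (pvRep ['$','R','E','S','E','T'] ['\x1b','[','0','m'] r))
            = ['\x1b','[','0','m'] ++ pvRep ['$','B','O','L','D'] ['\x1b','[','1','m']
                (pvRep ['$','C','O','L','O','R'] ['\x1b','[','%','d','m']
                  (pvRep ['$','R','E','S','E','T'] ['\x1b','[','0','m'] r)) :=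
          pvRep_append _ _ _ _ (by decide)
        show pvRep _ _ (pvRep _ _ (['\x1b','[','0','m'] ++ pvRep _ _ r)) = _
        rw [hskip1, hskip2]
        exact congrArg (['\x1b','[','0','m'] ++ ·) (ih r hlen)
      · by_cases h2 : (['$','C','O','L','O','R'] : List Char).isPrefixOf (c :: t) = true
        · obtain ⟨r, hr⟩ := List.isPrefixOf_iff_prefix.mp h2
          obtain ⟨rfl, rfl⟩ : c = '$' ∧ t = 'C'::'O'::'L'::'O'::'R'::r := by
            simpa [eq_comm, List.cons.injEq] using hr.symm
          have hlen : r.length ≤ k := by simp at h; omega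
          rw [pvScan, if_neg h1, if_pos h2]
          -- inner pass: no match at the head, then skip the '$'-free chunk "COLOR"
          rw [pvRep_neg _ _ _ _ h1]
          have hchunk : pvRep ['$','R','E','S','E','T'] ['\x1b','[','0','m']
              (['C','O','L','O','R'] ++ r)
              = ['C','O','L','O','R'] ++ pvRep ['$','R','E','S','E','T'] ['\x1b','[','0','m'] r :=
            pvRep_append _ _ _ _ (by decide)
        -- middle pass: the reconstituted "$COLOR" matches
          show pvRep _ _ (pvRep ['$','C','O','L','O','R'] _
            ('$' :: pvRep _ _ (['C','O','L','O','R'] ++ r))) = _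
          rw [hchunk]
          have hm : (['$','C','O','L','O','R'] : List Char).isPrefixOf
              ('$' :: ('C'::'O'::'L'::'O'::'R' :: pvRep ['$','R','E','S','E','T'] ['\x1b','[','0','m'] r)) = true :=
            List.isPrefixOf_iff_prefix.mpr ⟨_, rfl⟩
          show pvRep _ _ (pvRep _ _ ('$'::'C'::'O'::'L'::'O'::'R' :: pvRep _ _ r)) = _
          rw [pvRep_pos _ _ _ _ hm]
          have hskip : pvRep ['$','B','O','L','D'] ['\x1b','[','1','m']
              (['\x1b','[','%','d','m'] ++ pvRep ['$','C','O','L','O','R'] ['\x1b','[','%','d','m']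
                  (pvRep ['$','R','E','S','E','T'] ['\x1b','[','0','m'] r))
              = ['\x1b','[','%','d','m'] ++ pvRep ['$','B','O','L','D'] ['\x1b','[','1','m']
                  (pvRep ['$','C','O','L','O','R'] ['\x1b','[','%','d','m']
                    (pvRep ['$','R','E','S','E','T'] ['\x1b','[','0','m'] r)) :=
            pvRep_append _ _ _ _ (by decide)
          show pvRep _ _ (['\x1b','[','%','d','m'] ++ pvRep _ _ (pvRep _ _ r)) = _
          rw [hskip]
          exact congrArg (['\x1b','[','%','d','m'] ++ ·) (ih r hlen)
        · by_cases h3 : (['$','B','O','L','D'] : List Char).isPrefixOf (c :: t) = true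
          · obtain ⟨r, hr⟩ := List.isPrefixOf_iff_prefix.mp h3
            obtain ⟨rfl, rfl⟩ : c = '$' ∧ t = 'B'::'O'::'L'::'D'::r := by
              simpa [eq_comm, List.cons.injEq] using hr.symm
            have hlen : r.length ≤ k := by simp at h; omega
            rw [pvScan, if_neg h1, if_neg h2, if_pos h3]
            rw [pvRep_neg _ _ _ _ h1]
            have hchunk : pvRep ['$','R','E','S','E','T'] ['\x1b','[','0','m']
                (['B','O','L','D'] ++ r)
                = ['B','O','L','D'] ++ pvRep ['$','R','E','S','E','T'] ['\x1b','[','0','m'] r :=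
              pvRep_append _ _ _ _ (by decide)
            show pvRep _ _ (pvRep _ _ ('$' :: pvRep _ _ (['B','O','L','D'] ++ r))) = _
            rw [hchunk]
            have hne : ¬ (['$','C','O','L','O','R'] : List Char).isPrefixOf
                ('$' :: ('B'::'O'::'L'::'D' :: pvRep ['$','R','E','S','E','T'] ['\x1b','[','0','m'] r)) = true := by
              intro hx
              have := List.cons_prefix_cons.mp (List.isPrefixOf_iff_prefix.mp hx)
              have := List.cons_prefix_cons.mp this.2
              simp at this
            show pvRep _ _ (pvRep _ _ ('$'::'B'::'O'::'L'::'D' :: pvRep _ _ r)) = _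
            rw [pvRep_neg _ _ _ _ hne]
            have hchunk2 : pvRep ['$','C','O','L','O','R'] ['\x1b','[','%','d','m']
                (['B','O','L','D'] ++ pvRep ['$','R','E','S','E','T'] ['\x1b','[','0','m'] r)
                = ['B','O','L','D'] ++ pvRep ['$','C','O','L','O','R'] ['\x1b','[','%','d','m']
                    (pvRep ['$','R','E','S','E','T'] ['\x1b','[','0','m'] r) :=
              pvRep_append _ _ _ _ (by decide)
            show pvRep _ _ ('$' :: pvRep _ _ (['B','O','L','D'] ++ pvRep _ _ r)) = _
            rw [hchunk2]
            have hm : (['$','B','O','L','D'] : List Char).isPrefixOf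
                ('$' :: ('B'::'O'::'L'::'D' :: pvRep ['$','C','O','L','O','R'] ['\x1b','[','%','d','m']
                  (pvRep ['$','R','E','S','E','T'] ['\x1b','[','0','m'] r))) = true :=
              List.isPrefixOf_iff_prefix.mpr ⟨_, rfl⟩
            show pvRep _ _ ('$'::'B'::'O'::'L'::'D' :: pvRep _ _ (pvRep _ _ r)) = _
            rw [pvRep_pos _ _ _ _ hm]
            exact congrArg (['\x1b','[','1','m'] ++ ·) (ih r hlen)
          · -- no token matches at this position: every pass copies the head character
            have hlen : t.length ≤ k := by simp at h; omega
            rw [pvScan, if_neg h1, if_neg h2, if_neg h3]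
            rw [pvRep_neg _ _ _ _ h1]
            have hne2 : ¬ (['$','C','O','L','O','R'] : List Char).isPrefixOf
                (c :: pvRep ['$','R','E','S','E','T'] ['\x1b','[','0','m'] t) = true := by
              intro hx
              have hx' := List.cons_prefix_cons.mp (List.isPrefixOf_iff_prefix.mp hx)
              have hq := (pvPrefix_rep_iff ['R','E','S','E','T'] ['[','0','m'] '\x1b'
                ['C','O','L','O','R'] t (by decide) (by decide)).mp hx'.2
              exact h2 (List.isPrefixOf_iff_prefix.mpr
                (List.cons_prefix_cons.mpr ⟨hx'.1, hq⟩))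
            rw [pvRep_neg _ _ _ _ hne2]
            have hne3 : ¬ (['$','B','O','L','D'] : List Char).isPrefixOf
                (c :: pvRep ['$','C','O','L','O','R'] ['\x1b','[','%','d','m']
                  (pvRep ['$','R','E','S','E','T'] ['\x1b','[','0','m'] t)) = true := by
              intro hx
              have hx' := List.cons_prefix_cons.mp (List.isPrefixOf_iff_prefix.mp hx)
              have hq := (pvPrefix_rep_iff ['C','O','L','O','R'] ['[','%','d','m'] '\x1b'
                ['B','O','L','D'] _ (by decide) (by decide)).mp hx'.2
              have hq2 := (pvPrefix_rep_iff ['R','E','S','E','T'] ['[','0','m'] '\x1b'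
                ['B','O','L','D'] t (by decide) (by decide)).mp hq
              exact h3 (List.isPrefixOf_iff_prefix.mpr
                (List.cons_prefix_cons.mpr ⟨hx'.1, hq2⟩))
            rw [pvRep_neg _ _ _ _ hne3, ih t hlen]

-- ===== VERDICT (by name: the statement is the Claim_ definition above) =====
theorem apply_correct_formatter_sequences_spec : Claim_equal_apply_correct_formatter_sequences := by
  intro message _
  unfold Spec_apply_correct_formatter_sequences
  have hA : apply_correct_formatter_sequences message =
      PySem.Str.replace (PySem.Str.replace (PySem.Str.replace message "$RESET" RESET_SEQ)
        "$COLOR" COLOR_SEQ) "$BOLD" BOLD_SEQ := rfl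
  rw [hA]
  refine String.toList_inj.mp ?_
  have eR : ∀ s : List Char, PySem.Chars.replace s "$RESET".toList RESET_SEQ.toList
      = pvRep "$RESET".toList RESET_SEQ.toList s := fun s => pvReplace_eq s _ _ (by decide)
  have eC : ∀ s : List Char, PySem.Chars.replace s "$COLOR".toList COLOR_SEQ.toList
      = pvRep "$COLOR".toList COLOR_SEQ.toList s := fun s => pvReplace_eq s _ _ (by decide)
  have eB : ∀ s : List Char, PySem.Chars.replace s "$BOLD".toList BOLD_SEQ.toList
      = pvRep "$BOLD".toList BOLD_SEQ.toList s := fun s => pvReplace_eq s _ _ (by decide)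
  rw [PySem.Str.toList_replace, PySem.Str.toList_replace, PySem.Str.toList_replace,
    eR, eC, eB]
  rw [pvRo_eq, pvCo_eq, pvBo_eq, pvRn_eq, pvCn_eq, pvBn_eq]
  have : (apply_correct_formatter_sequences_alt message).toList = pvScan message.toList := by
    simp [apply_correct_formatter_sequences_alt]
  rw [this]
  exact pvMain message.toList.length message.toList le_rfl
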